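-- pv_equiv track=rewrite | github.com/Gss0217/CTGage | test_fhr.py | group_samples
-- ===== SOURCE A (Python) =====
-- def group_samples(gaps, names, data, original_data):
--     groups = {1: [], 2: [], 3: [], 4: [], 5: []}
--     for i, gap in enumerate(gaps):
--         if gap < -21:
--             groups[1].append((names[i], data[i], original_data[i]))
--         elif -21 <= gap < -7:
--             groups[2].append((names[i], data[i], original_data[i]))
--         elif -7 <= gap < 7:
--             groups[3].append((names[i], data[i], original_data[i]))
--         elif 7 <= gap < 21:
--             groups[4].append((names[i], data[i], original_data[i]))
--         else:  # gap >= 21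
--             groups[5].append((names[i], data[i], original_data[i]))
--     return groups
-- ===== SOURCE B (Python) =====
-- def group_samples(gaps, names, data, original_data):
--     rows = list(zip(gaps, names, data, original_data))
--     preds = {
--         1: lambda g: g < -21,
--         2: lambda g: -21 <= g < -7,
--         3: lambda g: -7 <= g < 7,
--         4: lambda g: 7 <= g < 21,
--         5: lambda g: 21 <= g,
--     }
--     return {k: [(n, d, od) for g, n, d, od in rows if p(g)]
--             for k, p in preds.items()}
-- ===== Notes on version B (the rewrite author's own statement) =====
-- stated objective: idiomatic
-- what changed: Instead of A's single index-based loop dispatching each sample into a mutable dict via an if/elif chain, B zips the inputs once and builds each of the five groups by its own filtering comprehension over the rows (five staged filter passes keyed by a predicate table); Pre_ excludes inputs where gaps is longer than names/data/original_data, on which A raises IndexError.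
import Mathlib
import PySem

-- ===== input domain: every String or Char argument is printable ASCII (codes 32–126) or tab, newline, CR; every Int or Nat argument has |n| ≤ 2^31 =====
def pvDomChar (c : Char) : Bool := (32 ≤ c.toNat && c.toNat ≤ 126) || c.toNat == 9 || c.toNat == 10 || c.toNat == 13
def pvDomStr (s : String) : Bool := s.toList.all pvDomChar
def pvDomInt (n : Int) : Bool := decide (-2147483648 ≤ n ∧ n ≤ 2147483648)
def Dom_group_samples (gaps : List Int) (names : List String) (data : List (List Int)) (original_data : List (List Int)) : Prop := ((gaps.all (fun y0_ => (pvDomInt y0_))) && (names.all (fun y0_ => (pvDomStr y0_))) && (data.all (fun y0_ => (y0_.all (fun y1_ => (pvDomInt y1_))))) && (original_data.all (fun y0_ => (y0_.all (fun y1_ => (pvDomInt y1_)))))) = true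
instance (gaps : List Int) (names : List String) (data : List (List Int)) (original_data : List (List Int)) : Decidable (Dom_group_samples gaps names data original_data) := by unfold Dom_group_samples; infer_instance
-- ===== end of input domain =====

-- B builds each of the five groups by its own filter pass over the zipped rows (a predicate
-- table and staged comprehensions) instead of A's single dispatch loop mutating a dict; same cost, more idiomatic.

-- ===== PORT A =====
def group_samples (gaps : List Int) (names : List String) (data : List (List Int)) (original_data : List (List Int)) : List (Int × List (String × List Int × List Int)) :=
  let groups : PySem.Dict Int (List (String × List Int × List Int)) :=
    PySem.Dict.ofList [(1, []), (2, []), (3, []), (4, []), (5, [])]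
  let groups :=
    (PySem.List.enumerate gaps).foldl (fun groups p =>
      let i := p.1
      let gap := p.2
      let item := (PySem.List.pyGetD names i "", PySem.List.pyGetD data i [], PySem.List.pyGetD original_data i [])
      if gap < -21 then groups.modify 1 [] (fun l => l ++ [item])
      else if -21 ≤ gap ∧ gap < -7 then groups.modify 2 [] (fun l => l ++ [item])
      else if -7 ≤ gap ∧ gap < 7 then groups.modify 3 [] (fun l => l ++ [item])
      else if 7 ≤ gap ∧ gap < 21 then groups.modify 4 [] (fun l => l ++ [item])
      else groups.modify 5 [] (fun l => l ++ [item])) groups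
  groups.items

-- ===== PORT B =====
def group_samples_alt (gaps : List Int) (names : List String) (data : List (List Int)) (original_data : List (List Int)) : List (Int × List (String × List Int × List Int)) :=
  let rows := gaps.zip (names.zip (data.zip original_data))
  let preds : List (Int × (Int → Bool)) :=
    [(1, fun g => decide (g < -21)),
     (2, fun g => decide (-21 ≤ g) && decide (g < -7)),
     (3, fun g => decide (-7 ≤ g) && decide (g < 7)),
     (4, fun g => decide (7 ≤ g) && decide (g < 21)),
     (5, fun g => decide (21 ≤ g))]
  preds.map (fun kp => (kp.1, (rows.filter (fun r => kp.2 r.1)).map (fun r => r.2)))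

-- ===== PRECONDITION & SPEC =====
-- Pre_ excludes exactly the inputs where gaps is longer than one of the other lists: there A raises IndexError.
def Pre_group_samples (gaps : List Int) (names : List String) (data : List (List Int)) (original_data : List (List Int)) : Prop :=
  gaps.length ≤ names.length ∧ gaps.length ≤ data.length ∧ gaps.length ≤ original_data.length
instance (gaps : List Int) (names : List String) (data : List (List Int)) (original_data : List (List Int)) : Decidable (Pre_group_samples gaps names data original_data) := by unfold Pre_group_samples; infer_instance
def pvWitness_group_samples : List Int × List String × List (List Int) × List (List Int) := ([0, -30, 25], ["a", "b", "c"], [[1], [2], [3]], [[4], [5], [6]])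

def Spec_group_samples (gaps : List Int) (names : List String) (data : List (List Int)) (original_data : List (List Int)) (out : List (Int × List (String × List Int × List Int))) : Prop := out = group_samples_alt gaps names data original_data
instance (gaps : List Int) (names : List String) (data : List (List Int)) (original_data : List (List Int)) (out : List (Int × List (String × List Int × List Int))) : Decidable (Spec_group_samples gaps names data original_data out) := by unfold Spec_group_samples; infer_instance

-- ===== CLAIM (what is proved, stated in full; the proofs are below) =====
def Claim_equal_group_samples : Prop := ∀ (gaps : List Int) (names : List String) (data : List (List Int)) (original_data : List (List Int)), Dom_group_samples gaps names data original_data → Pre_group_samples gaps names data original_data → Spec_group_samples gaps names data original_data (group_samples gaps names data original_data)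

-- ===== LEMMAS AND PROOFS =====

-- the bucket key A's if/elif chain selects
def pvKeyOf (g : Int) : Int :=
  if g < -21 then 1 else if g < -7 then 2 else if g < 7 then 3 else if g < 21 then 4 else 5

lemma pv_keyOf_mem (g : Int) : pvKeyOf g ∈ ([1, 2, 3, 4, 5] : List Int) := by
  unfold pvKeyOf; split_ifs <;> simp

-- A's if/elif chain is a single modify at the key pvKeyOf selects
lemma pv_step_eq (d : PySem.Dict Int (List (String × List Int × List Int))) (g : Int)
    (f : List (String × List Int × List Int) → List (String × List Int × List Int)) :
    (if g < -21 then d.modify 1 [] f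
     else if -21 ≤ g ∧ g < -7 then d.modify 2 [] f
     else if -7 ≤ g ∧ g < 7 then d.modify 3 [] f
     else if 7 ≤ g ∧ g < 21 then d.modify 4 [] f
     else d.modify 5 [] f)
    = d.modify (pvKeyOf g) [] f := by
  unfold pvKeyOf; split_ifs <;> first | rfl | omega

-- A's enumerate/index loop is the canonical keyed grouping fold over the zipped rows
lemma pv_loop_eq (ns : List String) (ds os : List (List Int)) :
    ∀ (gs : List Int) (i : Nat) (d : PySem.Dict Int (List (String × List Int × List Int))),
    i + gs.length ≤ ns.length → i + gs.length ≤ ds.length → i + gs.length ≤ os.length →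
    (PySem.List.enumerate gs (i : Int)).foldl (fun groups p =>
        let i := p.1
        let gap := p.2
        let item := (PySem.List.pyGetD ns i "", PySem.List.pyGetD ds i [], PySem.List.pyGetD os i [])
        if gap < -21 then groups.modify 1 [] (fun l => l ++ [item])
        else if -21 ≤ gap ∧ gap < -7 then groups.modify 2 [] (fun l => l ++ [item])
        else if -7 ≤ gap ∧ gap < 7 then groups.modify 3 [] (fun l => l ++ [item])
        else if 7 ≤ gap ∧ gap < 21 then groups.modify 4 [] (fun l => l ++ [item])
        else groups.modify 5 [] (fun l => l ++ [item])) d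
    = ((gs.zip ((ns.drop i).zip ((ds.drop i).zip (os.drop i)))).map
        (fun r => (pvKeyOf r.1, r.2))).foldl
        (fun groups p => groups.modify p.1 [] (fun l => l ++ [p.2])) d := by
  intro gs
  induction gs with
  | nil => intro i d _ _ _; simp [PySem.List.enumerate]
  | cons g gs ih =>
    intro i d h1 h2 h3
    have hn : i < ns.length := by simp at h1 ⊢; omega
    have hd : i < ds.length := by simp at h2 ⊢; omega
    have ho : i < os.length := by simp at h3 ⊢; omega
    rw [PySem.List.enumerate_cons, List.drop_eq_getElem_cons hn, List.drop_eq_getElem_cons hd,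
        List.drop_eq_getElem_cons ho, List.zip_cons_cons, List.zip_cons_cons, List.zip_cons_cons,
        List.map_cons, List.foldl_cons, List.foldl_cons]
    have hcast : ((i : Int) + 1) = ((i + 1 : Nat) : Int) := by push_cast; ring
    rw [hcast]
    have hstep :
        (let i' := (i : Int)
         let gap := g
         let item := (PySem.List.pyGetD ns i' "", PySem.List.pyGetD ds i' [], PySem.List.pyGetD os i' [])
         if gap < -21 then d.modify 1 [] (fun l => l ++ [item])
         else if -21 ≤ gap ∧ gap < -7 then d.modify 2 [] (fun l => l ++ [item])
         else if -7 ≤ gap ∧ gap < 7 then d.modify 3 [] (fun l => l ++ [item])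
         else if 7 ≤ gap ∧ gap < 21 then d.modify 4 [] (fun l => l ++ [item])
         else d.modify 5 [] (fun l => l ++ [item]))
        = d.modify (pvKeyOf g) [] (fun l => l ++ [((ns[i], ds[i], os[i]) : String × List Int × List Int)]) := by
      show (if g < -21 then _ else _) = _
      rw [pv_step_eq]
      simp [PySem.List.pyGetD_natCast, hn, hd, ho]
    rw [hstep]
    exact ih (i + 1) _ (by simp at h1 ⊢; omega) (by simp at h2 ⊢; omega) (by simp at h3 ⊢; omega)

-- the filtered projection at a key is B's filter pass, when the predicates agree pointwise
lemma pv_filter_eq (rows : List (Int × (String × List Int × List Int))) (k : Int) (p : Int → Bool)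
    (hp : ∀ g : Int, (pvKeyOf g == k) = p g) :
    ((rows.map (fun r => (pvKeyOf r.1, r.2))).filter (fun q => q.1 == k)).map (fun x => x.2)
    = (rows.filter (fun r => p r.1)).map (fun r => r.2) := by
  rw [List.filter_map, List.map_map]
  have : ((fun q : Int × (String × List Int × List Int) => q.1 == k) ∘
      (fun r : Int × (String × List Int × List Int) => (pvKeyOf r.1, r.2))) = fun r => p r.1 := by
    funext r; exact hp r.1
  rw [this]
  rfl

-- ===== VERDICT (by name: the statement is the Claim_ definition above) =====
theorem group_samples_spec : Claim_equal_group_samples := by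
  intro gaps names data original_data _ hPre
  obtain ⟨h1, h2, h3⟩ := hPre
  unfold Spec_group_samples
  simp only [group_samples, group_samples_alt]
  have h := pv_loop_eq names data original_data gaps 0
      (PySem.Dict.ofList [(1, []), (2, []), (3, []), (4, []), (5, [])]) (by simpa) (by simpa) (by simpa)
  simp only [List.drop_zero, Nat.cast_zero] at h
  rw [h]
  set rows := gaps.zip (names.zip (data.zip original_data)) with hrows
  set l := rows.map (fun r => (pvKeyOf r.1, r.2)) with hl
  set d0 : PySem.Dict Int (List (String × List Int × List Int)) :=
    PySem.Dict.ofList [(1, []), (2, []), (3, []), (4, []), (5, [])] with hd0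
  set D := l.foldl (fun groups p => groups.modify p.1 [] (fun l => l ++ [p.2])) d0 with hD
  have hkeymem : ∀ y ∈ l.map (fun q => q.1), y ∈ ([1, 2, 3, 4, 5] : List Int) := by
    intro y hy
    rw [hl, List.map_map] at hy
    obtain ⟨r, -, hr⟩ := List.mem_map.mp hy
    exact hr ▸ pv_keyOf_mem r.1
  have hkeys : D.keys = [1, 2, 3, 4, 5] := by
    have hk := PySem.Dict.keys_foldl_modify_key l (fun q => q.1) []
        (fun _ p => (fun l => l ++ [p.2])) d0
    rw [hD, hk]
    have hd0k : d0.keys = [1, 2, 3, 4, 5] := by rw [hd0]; decide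
    rw [hd0k, PySem.Set.update_eq_append_filter]
    have : (PySem.Set.ofList (l.map (fun q => q.1))).filter
        (fun y => !(PySem.Set.contains ([1, 2, 3, 4, 5] : List Int) y)) = [] := by
      rw [List.filter_eq_nil_iff]
      intro y hy
      have : y ∈ ([1, 2, 3, 4, 5] : List Int) := hkeymem y ((PySem.Set.mem_ofList _ y).mp hy)
      simp [this]
    rw [this, List.append_nil]
  have hnodup : D.keys.Nodup := by rw [hkeys]; decide
  have hitems := PySem.Dict.items_eq_map_keys D hnodup []
  rw [hitems, hkeys]
  have hget : ∀ k : Int, d0.getD k [] = [] →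
      D.getD k [] = (l.filter (fun q => q.1 == k)).map (fun x => x.2) := by
    intro k hk
    rw [hD, PySem.Dict.getD_foldl_modify_append, hk, List.nil_append]
  simp only [List.map_cons, List.map_nil]
  refine List.ext_getElem (by simp) ?_
  intro n hn hn'
  have hcase : n = 0 ∨ n = 1 ∨ n = 2 ∨ n = 3 ∨ n = 4 := by simp at hn; omega
  rcases hcase with rfl | rfl | rfl | rfl | rfl <;>
    simp only [List.getElem_cons_zero, List.getElem_cons_succ] <;>
    refine Prod.ext rfl ?_
  · rw [hget 1 (by rw [hd0]; decide), pv_filter_eq rows 1 (fun g => decide (g < -21))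
      (by intro g; unfold pvKeyOf; split_ifs <;> simp <;> omega)]
  · rw [hget 2 (by rw [hd0]; decide), pv_filter_eq rows 2 (fun g => decide (-21 ≤ g) && decide (g < -7))
      (by intro g; unfold pvKeyOf; split_ifs <;> simp <;> omega)]
  · rw [hget 3 (by rw [hd0]; decide), pv_filter_eq rows 3 (fun g => decide (-7 ≤ g) && decide (g < 7))
      (by intro g; unfold pvKeyOf; split_ifs <;> simp <;> omega)]
  · rw [hget 4 (by rw [hd0]; decide), pv_filter_eq rows 4 (fun g => decide (7 ≤ g) && decide (g < 21))
      (by intro g; unfold pvKeyOf; split_ifs <;> simp <;> omega)]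
  · rw [hget 5 (by rw [hd0]; decide), pv_filter_eq rows 5 (fun g => decide (21 ≤ g))
      (by intro g; unfold pvKeyOf; split_ifs <;> simp <;> omega)]
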